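-- pv_equiv track=rewrite | github.com/JoseAALC/MKLcomparasion | bio.py | fitness1
-- ===== SOURCE A (Python) =====
-- def fitness1(genom,extra=None):
--     sumation =0
--     for i in range(len(genom)):
--         if i %2 ==0:
--             sumation+=genom[i]
--         else:
--             sumation-=genom[i]
--     return sumation*genom[0]
-- ===== SOURCE B (Python) =====
-- def fitness1(genom, extra=None):
--     # Two staged strided passes instead of one branched indexed loop:
--     # the alternating sum is sum(evens slice) - sum(odds slice).
--     evens = sum(genom[0::2])
--     odds = sum(genom[1::2])
--     return (evens - odds) * genom[0]
-- ===== Notes on version B (the rewrite author's own statement) =====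
-- stated objective: alternative
-- what changed: Replaces the single indexed loop with an i%2 branch by two separate strided-slice passes (sum of genom[0::2] minus sum of genom[1::2]), eliminating the index loop and the parity branch entirely.
import Mathlib
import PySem

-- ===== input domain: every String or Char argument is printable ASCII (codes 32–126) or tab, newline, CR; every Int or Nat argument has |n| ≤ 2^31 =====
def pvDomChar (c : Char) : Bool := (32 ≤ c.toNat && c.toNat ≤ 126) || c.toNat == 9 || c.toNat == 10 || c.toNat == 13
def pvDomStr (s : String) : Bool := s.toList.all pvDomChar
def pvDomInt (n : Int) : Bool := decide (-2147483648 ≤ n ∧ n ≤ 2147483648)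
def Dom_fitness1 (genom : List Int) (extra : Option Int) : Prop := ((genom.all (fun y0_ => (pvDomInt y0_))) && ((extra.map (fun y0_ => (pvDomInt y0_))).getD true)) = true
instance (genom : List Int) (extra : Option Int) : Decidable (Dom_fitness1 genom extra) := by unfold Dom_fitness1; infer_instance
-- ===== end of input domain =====

-- B replaces A's single indexed loop with an i%2 parity branch by two staged strided-slice passes (evens minus odds), an alternative decomposition of the same cost.


-- ===== PORT A =====
-- indices produced by range(len(genom)) are always in range, so pyGetD is exact there;
-- the final subscript of genom at index zero is exact under Pre_ (nonempty genom).
def fitness1 (genom : List Int) (extra : Option Int) : Int :=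
  let sumation : Int :=
    (PySem.List.pyRange 0 (PySem.List.len genom) 1).foldl
      (fun s i =>
        if PySem.Int.mod i 2 = 0 then s + PySem.List.pyGetD genom i 0
        else s - PySem.List.pyGetD genom i 0) 0
  sumation * PySem.List.pyGetD genom 0 0

-- ===== PORT B =====
-- evens = sum(genom[0::2]); odds = sum(genom[1::2]); return (evens - odds) times the first element
-- (step-2 slices ported with PySem.List.slice?, which is exact; step 2 ≠ 0 so it never returns none)
def fitness1_alt (genom : List Int) (extra : Option Int) : Int :=
  let evens : Int := ((PySem.List.slice? genom (some 0) none 2).getD []).sum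
  let odds : Int := ((PySem.List.slice? genom (some 1) none 2).getD []).sum
  (evens - odds) * PySem.List.pyGetD genom 0 0

-- ===== PRECONDITION & SPEC =====
-- Pre_ excludes the empty list, on which both Pythons raise IndexError at the final subscript of genom at index zero.
def Pre_fitness1 (genom : List Int) (extra : Option Int) : Prop := genom ≠ []
instance (genom : List Int) (extra : Option Int) : Decidable (Pre_fitness1 genom extra) := by unfold Pre_fitness1; infer_instance
def pvWitness_fitness1 : List Int × Option Int := ([3, 1, 4], none)

def Spec_fitness1 (genom : List Int) (extra : Option Int) (out : Int) : Prop := out = fitness1_alt genom extra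
instance (genom : List Int) (extra : Option Int) (out : Int) : Decidable (Spec_fitness1 genom extra out) := by unfold Spec_fitness1; infer_instance

-- ===== CLAIM (what is proved, stated in full; the proofs are below) =====
def Claim_equal_fitness1 : Prop := ∀ (genom : List Int) (extra : Option Int), Dom_fitness1 genom extra → Pre_fitness1 genom extra → Spec_fitness1 genom extra (fitness1 genom extra)

-- ===== LEMMAS AND PROOFS =====

-- proof helper: the even-index subsequence of a list
def evensL : List Int → List Int
  | [] => []
  | [x] => [x]
  | x :: _ :: r => x :: evensL r

-- the filterMap form slice? reduces to, characterised as evensL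
theorem filterMap_even_eq : ∀ (xs : List Int),
    List.filterMap (fun k => xs[2*k]?) (List.range ((xs.length+1)/2)) = evensL xs
  | [] => by simp [evensL]
  | [x] => by simp [evensL, List.range_succ]
  | x :: y :: r => by
      have h : ((x :: y :: r).length + 1) / 2 = (r.length + 1) / 2 + 1 := by
        simp [List.length_cons]; omega
      rw [h, List.range_succ_eq_map]
      simp only [List.filterMap_cons, List.filterMap_map]
      have hc : ((fun k => (x :: y :: r)[2 * k]?) ∘ Nat.succ) = fun k => r[2*k]? := by
        funext k
        show (x :: y :: r)[2*(k+1)]? = r[2*k]?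
        have h2 : 2*(k+1) = (2*k)+2 := by omega
        rw [h2]; simp
      rw [hc, filterMap_even_eq r]
      simp [evensL]

-- genom[0::2] is the even-index subsequence
theorem slice2_zero (xs : List Int) : PySem.List.slice? xs (some 0) none 2 = some (evensL xs) := by
  unfold PySem.List.slice? PySem.List.sliceIndices
  norm_num
  have hcount : (if 0 < xs.length then (((xs.length : Int) + 2 - 1) / 2).toNat else 0)
      = (xs.length + 1) / 2 := by
    split_ifs with h
    · omega
    · omega
  rw [hcount]
  have hf : (fun x : ℕ => xs[(2 * (x:Int)).toNat]?) = fun k => xs[2*k]? := by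
    funext k
    have h2 : (2*(k:Int)).toNat = 2*k := by omega
    rw [h2]
  rw [hf]
  exact filterMap_even_eq xs

-- genom[1::2] is the even-index subsequence of the tail
theorem slice2_one (xs : List Int) : PySem.List.slice? xs (some 1) none 2 = some (evensL xs.tail) := by
  unfold PySem.List.slice? PySem.List.sliceIndices
  norm_num
  match xs with
  | [] => simp [evensL]
  | x :: r =>
    have hmin : min 1 ((x :: r).length : Int) = 1 := by
      simp only [List.length_cons]
      omega
    rw [hmin]
    have hcount : (if 1 < (x :: r).length then ((((x :: r).length : Int) - 1 + 2 - 1) / 2).toNat else 0)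
        = (r.length + 1) / 2 := by
      simp only [List.length_cons]
      split_ifs with h
      · push_cast; omega
      · omega
    rw [hcount]
    have hf : (fun k : ℕ => (x :: r)[(1 + 2 * (k:Int)).toNat]?) = fun k => r[2*k]? := by
      funext k
      have h2 : (1 + 2 * (k:Int)).toNat = (2*k) + 1 := by omega
      rw [h2]
      simp
    rw [hf]
    exact filterMap_even_eq r

-- bridge accumulator for A's loop: consume two elements at a time
def pairLoop : List Int → Int → Int
  | a :: b :: rest, total => pairLoop rest (total + (a - b))
  | [a], total => total + a
  | [], total => total

-- A's indexed alternating-sign loop, started at an even index 2*k, computes pairLoop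
-- on the suffix ys.drop (2*k).
theorem loopA_eq : ∀ (xs ys : List Int) (k : ℕ) (acc : Int), ys.drop (2*k) = xs →
    (PySem.List.pyRange ((2*k : ℕ) : Int) (((2*k : ℕ) : Int) + xs.length) 1).foldl
      (fun s i =>
        if PySem.Int.mod i 2 = 0 then s + PySem.List.pyGetD ys i 0
        else s - PySem.List.pyGetD ys i 0) acc
    = pairLoop xs acc
  | [], ys, k, acc, h => by
      simp [PySem.List.pyRange_one_eq_nil, pairLoop]
  | [a], ys, k, acc, h => by
      have hget : ys[2*k]? = some a := by
        have h0 : (ys.drop (2*k))[0]? = some a := by simp [h]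
        rw [List.getElem?_drop] at h0; simpa using h0
      have hrange : PySem.List.pyRange ((2*k : ℕ) : Int) (((2*k : ℕ) : Int) + 1) 1
          = [((2*k : ℕ) : Int)] := PySem.List.pyRange_one_singleton _
      have hmod : PySem.Int.mod ((2*k : ℕ) : Int) 2 = 0 := by
        rw [PySem.Int.mod_eq_emod_of_pos (by omega)]; omega
      have hgd : PySem.List.pyGetD ys ((2*k : ℕ) : Int) 0 = a := by
        rw [PySem.List.pyGetD_natCast]; simp [List.getD, hget]
      rw [show ((([a] : List Int).length : ℕ) : Int) = 1 from by simp, hrange]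
      simp only [List.foldl_cons, List.foldl_nil]
      rw [if_pos hmod, hgd]
      simp [pairLoop]
  | a :: b :: rest, ys, k, acc, h => by
      have hga : ys[2*k]? = some a := by
        have h0 : (ys.drop (2*k))[0]? = some a := by simp [h]
        rw [List.getElem?_drop] at h0; simpa using h0
      have hgb : ys[2*k+1]? = some b := by
        have h0 : (ys.drop (2*k))[1]? = some b := by simp [h]
        rw [List.getElem?_drop] at h0; simpa using h0
      have hmoda : PySem.Int.mod ((2*k : ℕ) : Int) 2 = 0 := by
        rw [PySem.Int.mod_eq_emod_of_pos (by omega)]; omega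
      have hmodb : PySem.Int.mod (((2*k : ℕ) : Int) + 1) 2 = 1 := by
        rw [PySem.Int.mod_eq_emod_of_pos (by omega)]; omega
      have hgda : PySem.List.pyGetD ys ((2*k : ℕ) : Int) 0 = a := by
        rw [PySem.List.pyGetD_natCast]; simp [List.getD, hga]
      have hgdb : PySem.List.pyGetD ys (((2*k : ℕ) : Int) + 1) 0 = b := by
        rw [show ((2*k : ℕ) : Int) + 1 = ((2*k+1 : ℕ) : Int) by push_cast; ring,
          PySem.List.pyGetD_natCast]
        simp [List.getD, hgb]
      have hdrop : ys.drop (2*(k+1)) = rest := by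
        have h2' : List.drop 2 (List.drop (2*k) ys) = rest := by rw [h]; rfl
        rw [List.drop_drop] at h2'
        rw [show 2*(k+1) = 2*k + 2 from by omega]
        simpa [Nat.add_comm] using h2'
      have hrec := loopA_eq rest ys (k+1) (acc + (a - b)) hdrop
      have hlen : (((a :: b :: rest).length : ℕ) : Int) = (rest.length : Int) + 2 := by
        simp; ring
      have h1 : PySem.List.pyRange ((2*k : ℕ) : Int) (((2*k : ℕ) : Int) + ((a :: b :: rest).length : Int)) 1
          = ((2*k : ℕ) : Int) :: PySem.List.pyRange (((2*k : ℕ) : Int) + 1) (((2*k : ℕ) : Int) + ((a :: b :: rest).length : Int)) 1 :=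
        PySem.List.pyRange_one_cons (by rw [hlen]; omega)
      have h2 : PySem.List.pyRange (((2*k : ℕ) : Int) + 1) (((2*k : ℕ) : Int) + ((a :: b :: rest).length : Int)) 1
          = (((2*k : ℕ) : Int) + 1) :: PySem.List.pyRange (((2*k : ℕ) : Int) + 1 + 1) (((2*k : ℕ) : Int) + ((a :: b :: rest).length : Int)) 1 :=
        PySem.List.pyRange_one_cons (by rw [hlen]; omega)
      have hrangeEq : PySem.List.pyRange (((2*k : ℕ) : Int) + 1 + 1) (((2*k : ℕ) : Int) + ((a :: b :: rest).length : Int)) 1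
          = PySem.List.pyRange ((2*(k+1) : ℕ) : Int) (((2*(k+1) : ℕ) : Int) + (rest.length : Int)) 1 := by
        have e1 : ((2*k : ℕ) : Int) + 1 + 1 = ((2*(k+1) : ℕ) : Int) := by push_cast; ring
        have e2 : ((2*k : ℕ) : Int) + ((a :: b :: rest).length : Int)
            = ((2*(k+1) : ℕ) : Int) + (rest.length : Int) := by
          push_cast [List.length_cons]; ring
        rw [e1, e2]
      rw [h1, h2, hrangeEq]
      simp only [List.foldl_cons]
      rw [if_pos hmoda, if_neg (by rw [hmodb]; norm_num), hgda, hgdb]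
      rw [show acc + a - b = acc + (a - b) from by ring]
      rw [hrec]
      simp [pairLoop]

-- evensL of a tail, one step
theorem evensL_cons_sum (b : Int) (rest : List Int) :
    (evensL (b :: rest)).sum = b + (evensL rest.tail).sum := by
  match rest with
  | [] => simp [evensL]
  | c :: r' => simp [evensL]

-- pairLoop computes acc + sum(evens) - sum(odds)
theorem pairLoop_eq : ∀ (xs : List Int) (acc : Int),
    pairLoop xs acc = acc + (evensL xs).sum - (evensL xs.tail).sum
  | [], acc => by simp [pairLoop, evensL]
  | [a], acc => by simp [pairLoop, evensL]
  | a :: b :: rest, acc => by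
      rw [show pairLoop (a :: b :: rest) acc = pairLoop rest (acc + (a - b)) from rfl]
      rw [pairLoop_eq rest (acc + (a - b))]
      rw [show evensL (a :: b :: rest) = a :: evensL rest from rfl]
      rw [show (a :: b :: rest).tail = b :: rest from rfl]
      rw [List.sum_cons, evensL_cons_sum]
      ring

-- ===== VERDICT (by name: the statement is the Claim_ definition above) =====
theorem fitness1_spec : Claim_equal_fitness1 := by
  intro genom extra _hdom _hpre
  unfold Spec_fitness1 fitness1 fitness1_alt
  have hA := loopA_eq genom genom 0 0 (by simp)
  simp only [show (2*0 : ℕ) = 0 from rfl, Nat.cast_zero, zero_add] at hA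
  simp only [PySem.List.len_eq]
  rw [hA, pairLoop_eq, slice2_zero, slice2_one]
  simp
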